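-- pv_equiv track=rewrite | github.com/Avagr/vlmflow | utils/text.py | retokenize_labels
-- ===== SOURCE A (Python) =====
-- def retokenize_labels(labels_from: list[tuple[str, str]], tokens_to: list[str]) -> list[list[str]]:
--     new_labels: list[list[str]] = [[] for _ in tokens_to]
--
--     token_to_idx = 0
--     pos_in_token_to = 0
--     for text, label in labels_from:
--         new_labels[token_to_idx].append(label)
--         pos_in_token_to += len(text)
--         while token_to_idx < len(tokens_to) and pos_in_token_to >= len(tokens_to[token_to_idx]):
--             pos_in_token_to -= len(tokens_to[token_to_idx])
--             token_to_idx += 1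
--             if token_to_idx == len(tokens_to) or pos_in_token_to <= 0:
--                 break
--             new_labels[token_to_idx].append(label)
--
--     return new_labels
-- ===== SOURCE B (Python) =====
-- def retokenize_labels(labels_from: list[tuple[str, str]], tokens_to: list[str]) -> list[list[str]]:
--     # Boundary-table version: token boundaries are precomputed as prefix sums;
--     # label offsets are nondecreasing, so a single pointer over the boundaries
--     # locates each label's start token, and every later boundary that falls
--     # strictly inside the label's span also receives the label.
--     bounds = [0]
--     for tok in tokens_to:
--         bounds.append(bounds[-1] + len(tok))
--
--     new_labels: list[list[str]] = [[] for _ in tokens_to]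
--     start = 0  # character offset where the current label begins
--     s = 0      # index of the token containing offset `start`
--     for text, label in labels_from:
--         while bounds[s + 1] <= start:
--             s += 1
--         new_labels[s].append(label)
--         end = start + len(text)
--         k = s + 1
--         while k < len(tokens_to) and bounds[k] < end:
--             new_labels[k].append(label)
--             k += 1
--         start = end
--     return new_labels
-- ===== Notes on version B (the rewrite author's own statement) =====
-- stated objective: alternative
-- what changed: Replaces A's cursor-with-remainder walk (an inner while that subtracts token lengths from a running remainder, appending as it advances) by a precomputed prefix-sum boundary table: a pointer over the boundaries locates each label's start token and a direct scan appends the label to every boundary strictly inside its span; …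
-- outside the precondition, e.g. on retokenize_labels([('d', '0')], ['', 'ab']): A returns [['0'], ['0']], B returns [[], ['0']]
import Mathlib
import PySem

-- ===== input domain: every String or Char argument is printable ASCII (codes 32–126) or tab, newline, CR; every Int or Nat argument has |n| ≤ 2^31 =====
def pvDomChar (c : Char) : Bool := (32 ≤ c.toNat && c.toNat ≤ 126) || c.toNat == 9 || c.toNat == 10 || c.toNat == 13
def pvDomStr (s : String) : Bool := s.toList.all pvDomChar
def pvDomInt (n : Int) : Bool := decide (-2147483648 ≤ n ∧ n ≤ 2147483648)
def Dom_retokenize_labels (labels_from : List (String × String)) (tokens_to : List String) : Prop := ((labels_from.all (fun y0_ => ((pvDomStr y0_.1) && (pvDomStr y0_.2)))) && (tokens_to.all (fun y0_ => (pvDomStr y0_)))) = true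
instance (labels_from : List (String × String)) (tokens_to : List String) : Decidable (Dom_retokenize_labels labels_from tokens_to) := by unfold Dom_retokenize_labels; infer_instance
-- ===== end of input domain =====

-- B replaces A's cursor-with-remainder walk by a precomputed prefix-sum boundary table: a pointer
-- over the boundaries locates each label's start token and a direct scan appends the label to every
-- boundary strictly inside its span; alternative decomposition of the same cost.

-- ===== PORT A =====
-- new_labels[t].append(x)  (t always in range under Pre_; List.set is a no-op out of range)
def pvAppendAt (rows : List (List String)) (t : Nat) (x : String) : List (List String) :=
  rows.set t (rows.getD t [] ++ [x])

-- the inner while loop of A (advances the cursor, appending `label` along the way)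
def pvAWhile (tokens : List String) (label : String) (t : Nat) (p : Int)
    (rows : List (List String)) : Nat × Int × List (List String) :=
  if h : t < tokens.length ∧ PySem.Str.len (tokens.getD t "") ≤ p then
    -- p' := p - len(tokens[t]), t' := t + 1
    if t + 1 = tokens.length ∨ p - PySem.Str.len (tokens.getD t "") ≤ 0 then
      (t + 1, p - PySem.Str.len (tokens.getD t ""), rows)
    else
      pvAWhile tokens label (t + 1) (p - PySem.Str.len (tokens.getD t ""))
        (pvAppendAt rows (t + 1) label)
  else (t, p, rows)
termination_by tokens.length - t
decreasing_by omega

-- the outer for loop of A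
def pvALoop (tokens : List String) :
    List (String × String) → Nat → Int → List (List String) → List (List String)
  | [], _, _, rows => rows
  | (text, label) :: rest, t, p, rows =>
      let rows1 := pvAppendAt rows t label
      let p1 := p + PySem.Str.len text
      let s := pvAWhile tokens label t p1 rows1
      pvALoop tokens rest s.1 s.2.1 s.2.2

def retokenize_labels (labels_from : List (String × String)) (tokens_to : List String) :
    List (List String) :=
  pvALoop tokens_to labels_from 0 0 (tokens_to.map (fun _ => ([] : List String)))

-- ===== PORT B =====
-- bounds: running prefix sums of token lengths, [0, l0, l0+l1, ...]
def pvBounds : List String → Int → List Int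
  | [], acc => [acc]
  | tok :: rest, acc => acc :: pvBounds rest (acc + PySem.Str.len tok)

-- while bounds[s + 1] <= start: s += 1   (the bound s+1 < len only makes the loop total where
-- Python would raise IndexError; under Pre_ that index is always in range)
def pvFindS (bs : List Int) (start : Int) (s : Nat) : Nat :=
  if h : s + 1 < bs.length ∧ bs.getD (s + 1) 0 ≤ start then pvFindS bs start (s + 1) else s
termination_by bs.length - s
decreasing_by omega

-- while k < len(tokens_to) and bounds[k] < end: new_labels[k].append(label); k += 1
def pvBInner (bs : List Int) (n : Nat) (label : String) (e : Int) (k : Nat)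
    (rows : List (List String)) : List (List String) :=
  if h : k < n ∧ bs.getD k 0 < e then pvBInner bs n label e (k + 1) (pvAppendAt rows k label)
  else rows
termination_by n - k
decreasing_by omega

-- the outer for loop of B: locate the start token by the pointer s, append, scan the span
def pvBLoop (tokens : List String) (bs : List Int) :
    List (String × String) → Int → Nat → List (List String) → List (List String)
  | [], _, _, rows => rows
  | (text, label) :: rest, start, s, rows =>
      let s1 := pvFindS bs start s
      let rows1 := pvAppendAt rows s1 label
      let e := start + PySem.Str.len text
      let rows2 := pvBInner bs tokens.length label e (s1 + 1) rows1
      pvBLoop tokens bs rest e s1 rows2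

def retokenize_labels_alt (labels_from : List (String × String)) (tokens_to : List String) :
    List (List String) :=
  pvBLoop tokens_to (pvBounds tokens_to 0) labels_from 0 0
    (tokens_to.map (fun _ => ([] : List String)))

-- ===== PRECONDITION & SPEC =====
def pvTextSum (labels : List (String × String)) : Int := (labels.map (fun tl => PySem.Str.len tl.1)).sum
def pvTokSum (tokens : List String) : Int := (tokens.map PySem.Str.len).sum
-- character position of the left boundary of token k (prefix sum of the first k token lengths)
def pvS (tokens : List String) (k : Nat) : Int := pvTokSum (tokens.take k)
-- no zero-length token sits at character offset c
def pvNoEmptyAt (tokens : List String) (c : Int) : Prop :=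
  ¬ ∃ k < tokens.length, pvS tokens k = c ∧ PySem.Str.len (tokens.getD k "") = 0

-- Pre_ excludes the inputs on which A raises IndexError (tokens_to = [] with labels present, or a
-- label's character offset reaching the total token length so the cursor overruns), and the inputs
-- where a label's character offset coincides with a zero-length token: there A's attribution of
-- labels to empty tokens depends on its cursor's incidental position, a corner where B's placement
-- (skip the empty token, or overrun) is as defensible as A's.
def Pre_retokenize_labels (labels_from : List (String × String)) (tokens_to : List String) : Prop :=
  (labels_from = [] ∨ tokens_to ≠ []) ∧
  (∀ i < labels_from.length,
    pvNoEmptyAt tokens_to (pvTextSum (labels_from.take i)) ∧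
    (1 ≤ i → pvTextSum (labels_from.take i) < pvTokSum tokens_to))
instance (labels_from : List (String × String)) (tokens_to : List String) : Decidable (Pre_retokenize_labels labels_from tokens_to) := by unfold Pre_retokenize_labels pvNoEmptyAt; infer_instance

def pvWitness_retokenize_labels : (List (String × String)) × List String :=
  ([("ab", "X"), ("c", "Y")], ["a", "bc"])

def Spec_retokenize_labels (labels_from : List (String × String)) (tokens_to : List String) (out : List (List String)) : Prop := out = retokenize_labels_alt labels_from tokens_to
instance (labels_from : List (String × String)) (tokens_to : List String) (out : List (List String)) : Decidable (Spec_retokenize_labels labels_from tokens_to out) := by unfold Spec_retokenize_labels; infer_instance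

-- ===== CLAIM (what is proved, stated in full; the proofs are below) =====
def Claim_equal_retokenize_labels : Prop := ∀ (labels_from : List (String × String)) (tokens_to : List String), Dom_retokenize_labels labels_from tokens_to → Pre_retokenize_labels labels_from tokens_to → Spec_retokenize_labels labels_from tokens_to (retokenize_labels labels_from tokens_to)

-- ===== LEMMAS AND PROOFS =====

-- the two boundary ranks of a position e among the n+1 prefix sums
def pvCntLT (tokens : List String) (e : Int) : Nat :=
  (pvBounds tokens 0).countP (fun v => decide (v < e))
def pvCntLE (tokens : List String) (e : Int) : Nat :=
  (pvBounds tokens 0).countP (fun v => decide (v ≤ e))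
-- the cursor position A reaches after a label ending at e, entered at cursor t
def pvStop (tokens : List String) (t : Nat) (e : Int) : Nat :=
  if pvCntLT tokens e < pvCntLE tokens e then
    max (pvCntLT tokens e) (min (t + 1) (pvCntLE tokens e - 1))
  else pvCntLE tokens e - 1

theorem pvLen_nonneg (s : String) : 0 ≤ PySem.Str.len s := by
  rw [PySem.Str.len_eq]; exact Int.natCast_nonneg _

theorem pvS_zero (tokens : List String) : pvS tokens 0 = 0 := rfl

theorem pvS_succ (tokens : List String) (k : Nat) (hk : k < tokens.length) :
    pvS tokens (k + 1) = pvS tokens k + PySem.Str.len (tokens.getD k "") := by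
  have h1 : tokens.take (k + 1) = tokens.take k ++ [tokens[k]] := by
    rw [List.take_add_one, List.getElem?_eq_getElem hk]; rfl
  have h2 : tokens.getD k "" = tokens[k] := List.getD_eq_getElem _ _ hk
  rw [pvS, pvS, pvTokSum, pvTokSum, h1, h2, List.map_append, List.sum_append]
  simp

theorem pvS_mono (tokens : List String) {k l : Nat} (h : k ≤ l) :
    pvS tokens k ≤ pvS tokens l := by
  induction l with
  | zero => simp_all
  | succ l ih =>
    rcases Nat.lt_or_ge l tokens.length with hl | hl
    · rcases Nat.eq_or_lt_of_le h with rfl | h'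
      · omega
      · have := pvS_succ tokens l hl
        have := pvLen_nonneg (tokens.getD l "")
        have := ih (by omega)
        omega
    · have : tokens.take (l + 1) = tokens.take l := by
        rw [List.take_of_length_le (by omega), List.take_of_length_le (by omega)]
      rcases Nat.eq_or_lt_of_le h with rfl | h'
      · omega
      · have h2 := ih (by omega)
        simpa [pvS, this] using h2

theorem pvS_len (tokens : List String) : pvS tokens tokens.length = pvTokSum tokens := by
  simp [pvS]

theorem pv_length_appendAt (rows : List (List String)) (t : Nat) (x : String) :
    (pvAppendAt rows t x).length = rows.length := by
  simp [pvAppendAt]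

theorem pv_getD_appendAt (rows : List (List String)) (t : Nat) (x : String) (k : Nat)
    (ht : t < rows.length) :
    (pvAppendAt rows t x).getD k [] = rows.getD k [] ++ (if k = t then [x] else []) := by
  by_cases hk : k = t
  · subst hk
    simp [pvAppendAt, List.getD, ht]
  · simp [pvAppendAt, List.getD, List.getElem?_set_ne (by omega : t ≠ k), hk]

theorem pvS_cons_succ (tok : String) (rest : List String) (k : Nat) :
    pvS (tok :: rest) (k + 1) = PySem.Str.len tok + pvS rest k := by
  simp [pvS, pvTokSum]

theorem pvBounds_eq_map (tokens : List String) :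
    ∀ acc : Int, pvBounds tokens acc =
      (List.range (tokens.length + 1)).map (fun k => acc + pvS tokens k) := by
  induction tokens with
  | nil =>
    intro acc
    simp [pvBounds, List.range_one, pvS, pvTokSum]
  | cons tok rest ih =>
    intro acc
    rw [pvBounds, ih (acc + PySem.Str.len tok)]
    have hr : List.range (rest.length + 1 + 1) =
        0 :: (List.range (rest.length + 1)).map Nat.succ := List.range_succ_eq_map
    rw [show (tok :: rest).length + 1 = rest.length + 1 + 1 by simp, hr]
    simp only [List.map_cons, List.map_map]
    congr 1
    · rw [pvS_zero]; ring
    · apply List.map_congr_left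
      intro k _
      simp only [Function.comp_apply, Nat.succ_eq_add_one, pvS_cons_succ]
      ring

-- membership of k among the first `count` indices ↔ the monotone predicate holds at k
theorem pv_count_char (N : Nat) (q : Nat → Bool)
    (hdc : ∀ i j : Nat, i ≤ j → j ≤ N → q j = true → q i = true) :
    ∀ k ≤ N, (q k = true ↔ k < (List.range (N + 1)).countP q) := by
  induction N with
  | zero =>
    intro k hk
    have hk0 : k = 0 := by omega
    subst hk0
    cases h0 : q 0 <;> simp [List.range_one, h0]
  | succ N ih =>
    intro k hk
    rw [List.range_succ, List.countP_append]
    by_cases hN : q (N + 1) = true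
    · have hall : ∀ j, j ≤ N + 1 → q j = true := fun j hj => hdc j (N + 1) hj (by omega) hN
      have hcnt : (List.range (N + 1)).countP q = N + 1 := by
        rw [List.countP_eq_length.mpr (by
          intro x hx
          exact hall x (by have := List.mem_range.mp hx; omega))]
        simp
      have hone : ([N + 1].countP q) = 1 := by simp [hN]
      rw [hcnt, hone]
      simp only [hall k hk, true_iff]
      omega
    · have hone : ([N + 1].countP q) = 0 := by
        simp [hN]
      rw [hone, Nat.add_zero]
      rcases Nat.lt_or_ge k (N + 1) with hk' | hk'
      · exact ih (fun i j hij hj hqj => hdc i j hij (by omega) hqj) k (by omega)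
      · have hkN : k = N + 1 := by omega
        subst hkN
        have hle := @List.countP_le_length _ q (List.range (N + 1))
        rw [List.length_range] at hle
        constructor
        · intro h; exact absurd h hN
        · intro h; omega

theorem pvCntLT_eq (tokens : List String) (e : Int) :
    pvCntLT tokens e =
      (List.range (tokens.length + 1)).countP (fun k => decide (pvS tokens k < e)) := by
  rw [pvCntLT, pvBounds_eq_map tokens 0, List.countP_map]
  apply List.countP_congr
  intro k _
  simp

theorem pvCntLE_eq (tokens : List String) (e : Int) :
    pvCntLE tokens e =
      (List.range (tokens.length + 1)).countP (fun k => decide (pvS tokens k ≤ e)) := by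
  rw [pvCntLE, pvBounds_eq_map tokens 0, List.countP_map]
  apply List.countP_congr
  intro k _
  simp

theorem pvCntLT_char (tokens : List String) (e : Int) :
    ∀ k ≤ tokens.length, (pvS tokens k < e ↔ k < pvCntLT tokens e) := by
  intro k hk
  rw [pvCntLT_eq]
  have := pv_count_char tokens.length (fun k => decide (pvS tokens k < e))
    (by
      intro i j hij _ hj
      simp only [decide_eq_true_eq] at *
      exact lt_of_le_of_lt (pvS_mono tokens hij) hj)
    k hk
  simpa using this

theorem pvCntLE_char (tokens : List String) (e : Int) :
    ∀ k ≤ tokens.length, (pvS tokens k ≤ e ↔ k < pvCntLE tokens e) := by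
  intro k hk
  rw [pvCntLE_eq]
  have := pv_count_char tokens.length (fun k => decide (pvS tokens k ≤ e))
    (by
      intro i j hij _ hj
      simp only [decide_eq_true_eq] at *
      exact le_trans (pvS_mono tokens hij) hj)
    k hk
  simpa using this

theorem pvCnt_le (tokens : List String) (e : Int) :
    pvCntLT tokens e ≤ pvCntLE tokens e := by
  apply List.countP_mono_left
  intro x _ hx
  simp only [decide_eq_true_eq] at *
  omega

theorem pvCntLE_le (tokens : List String) (e : Int) :
    pvCntLE tokens e ≤ tokens.length + 1 := by
  rw [pvCntLE_eq]
  have := @List.countP_le_length _ (fun k => decide (pvS tokens k ≤ e))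
    (List.range (tokens.length + 1))
  rwa [List.length_range] at this

theorem pvCntLE_mono (tokens : List String) {e e' : Int} (h : e ≤ e') :
    pvCntLE tokens e ≤ pvCntLE tokens e' := by
  apply List.countP_mono_left
  intro x _ hx
  simp only [decide_eq_true_eq] at *
  omega

theorem pvBounds_length (tokens : List String) (acc : Int) :
    (pvBounds tokens acc).length = tokens.length + 1 := by
  rw [pvBounds_eq_map]
  simp

theorem pvBounds_getD0 (tokens : List String) (k : Nat) (hk : k ≤ tokens.length) :
    (pvBounds tokens 0).getD k 0 = pvS tokens k := by
  rw [pvBounds_eq_map, List.getD, List.getElem?_map, List.getElem?_range (by omega)]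
  simp

-- characterization of A's while loop: starting at cursor t with p = e - S t, it appends `label`
-- exactly at the tokens k with t < k < n whose left boundary lies strictly below e, and stops at
-- exactly the cursor position pvStop, with remainder e - S there.
theorem pvAWhile_spec (tokens : List String) (label : String) :
    ∀ (e : Int) (m t : Nat) (rows : List (List String)),
    tokens.length - t ≤ m → t < tokens.length → rows.length = tokens.length →
    pvS tokens t ≤ e →
    (∀ k < tokens.length,
        (pvAWhile tokens label t (e - pvS tokens t) rows).2.2.getD k [] =
          rows.getD k [] ++
            (if t < k ∧ pvS tokens k < e then [label] else [])) ∧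
    (pvAWhile tokens label t (e - pvS tokens t) rows).2.2.length = rows.length ∧
    (pvAWhile tokens label t (e - pvS tokens t) rows).1 = pvStop tokens t e ∧
    (pvAWhile tokens label t (e - pvS tokens t) rows).2.1 =
      e - pvS tokens ((pvAWhile tokens label t (e - pvS tokens t) rows).1) := by
  intro e m
  induction m with
  | zero => intro t rows hm ht hr he; omega
  | succ m ih =>
    intro t rows hm ht hr he
    have hS := pvS_succ tokens t ht
    have hcle := pvCnt_le tokens e
    have hlee := pvCntLE_le tokens e
    by_cases hcond : pvS tokens (t + 1) ≤ e
    · have hguard : t < tokens.length ∧ PySem.Str.len (tokens.getD t "") ≤ e - pvS tokens t :=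
        ⟨ht, by omega⟩
      by_cases hstop : t + 1 = tokens.length ∨
          e - pvS tokens t - PySem.Str.len (tokens.getD t "") ≤ 0
      · rw [pvAWhile, dif_pos hguard, if_pos hstop]
        refine ⟨?_, rfl, ?_, ?_⟩
        · intro k hk
          have hite : ¬(t < k ∧ pvS tokens k < e) := by
            rintro ⟨h1, h2⟩
            rcases hstop with h3 | h3
            · omega
            · have : e = pvS tokens (t + 1) := by omega
              have := pvS_mono tokens (show t + 1 ≤ k by omega)
              omega
          simp [hite]
        · dsimp only
          rcases hstop with h3 | h3
          · have hSn : pvS tokens tokens.length ≤ e := by rw [← h3]; omega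
            have hhi : pvCntLE tokens e = tokens.length + 1 := by
              have h1 := (pvCntLE_char tokens e tokens.length (by omega)).mp hSn
              omega
            unfold pvStop
            split_ifs with hlh <;> omega
          · have heq : e = pvS tokens (t + 1) := by omega
            have hlo : pvCntLT tokens e ≤ t + 1 := by
              by_contra hcon
              have := (pvCntLT_char tokens e (t + 1) (by omega)).mpr (by omega)
              omega
            have hhi : t + 1 < pvCntLE tokens e :=
              (pvCntLE_char tokens e (t + 1) (by omega)).mp (by omega)
            unfold pvStop
            split_ifs with hlh <;> omega
        · dsimp only
          omega
      · rw [pvAWhile, dif_pos hguard, if_neg hstop]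
        rw [not_or] at hstop
        have ht1 : t + 1 < tokens.length := by omega
        have hlt1 : pvS tokens (t + 1) < e := by omega
        have harg : e - pvS tokens t - PySem.Str.len (tokens.getD t "") =
            e - pvS tokens (t + 1) := by omega
        rw [harg]
        have hr1 : (pvAppendAt rows (t + 1) label).length = tokens.length := by
          rw [pv_length_appendAt]; exact hr
        obtain ⟨hrows, hlen, hcur, hrem⟩ :=
          ih (t + 1) (pvAppendAt rows (t + 1) label) (by omega) ht1 hr1 hcond
        refine ⟨?_, by rw [hlen, pv_length_appendAt], ?_, hrem⟩
        · intro k hk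
          rw [hrows k hk, pv_getD_appendAt rows (t + 1) label k (by omega)]
          by_cases hkt : k = t + 1
          · subst hkt
            simp [show t < t + 1 by omega, hlt1]
          · have : (t + 1 < k ∧ pvS tokens k < e) ↔ (t < k ∧ pvS tokens k < e) := by
              constructor <;> rintro ⟨h1, h2⟩ <;> exact ⟨by omega, h2⟩
            simp [hkt, this]
        · rw [hcur]
          have hlo2 : t + 1 < pvCntLT tokens e :=
            (pvCntLT_char tokens e (t + 1) (by omega)).mp hlt1
          unfold pvStop
          split_ifs with hlh <;> omega
    · have hguard : ¬(t < tokens.length ∧ PySem.Str.len (tokens.getD t "") ≤ e - pvS tokens t) := by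
        rintro ⟨-, h2⟩; omega
      rw [pvAWhile, dif_neg hguard]
      refine ⟨?_, rfl, ?_, ?_⟩
      · intro k hk
        have hite : ¬(t < k ∧ pvS tokens k < e) := by
          rintro ⟨h1, h2⟩
          have := pvS_mono tokens (show t + 1 ≤ k by omega)
          omega
        simp [hite]
      · dsimp only
        have hhi1 : t < pvCntLE tokens e :=
          (pvCntLE_char tokens e t (by omega)).mp he
        have hhi2 : pvCntLE tokens e ≤ t + 1 := by
          by_contra hcon
          have := (pvCntLE_char tokens e (t + 1) (by omega)).mpr (by omega)
          omega
        unfold pvStop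
        split_ifs with hlh <;> omega
      · dsimp only

-- when no zero-length token sits at e, A's stop position is the token containing e (rank LE - 1)
theorem pvStop_eq (tokens : List String) (t : Nat) (e : Int) (hne : pvNoEmptyAt tokens e) :
    pvStop tokens t e = pvCntLE tokens e - 1 := by
  unfold pvStop
  split_ifs with hlh
  · -- e is a boundary value; with no duplicate at e, LE = LT + 1
    have hle := pvCntLE_le tokens e
    have hone : pvCntLE tokens e = pvCntLT tokens e + 1 := by
      by_contra hcon
      have h2 : pvCntLT tokens e + 1 < pvCntLE tokens e := by omega
      have hLTle : pvCntLT tokens e ≤ tokens.length := by omega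
      have hS1 : pvS tokens (pvCntLT tokens e) = e := by
        have ha : pvS tokens (pvCntLT tokens e) ≤ e :=
          (pvCntLE_char tokens e (pvCntLT tokens e) hLTle).mpr (by omega)
        have hb : ¬ pvS tokens (pvCntLT tokens e) < e := by
          intro hx
          have := (pvCntLT_char tokens e (pvCntLT tokens e) hLTle).mp hx
          omega
        omega
      have hS2 : pvS tokens (pvCntLT tokens e + 1) = e := by
        have ha : pvS tokens (pvCntLT tokens e + 1) ≤ e :=
          (pvCntLE_char tokens e (pvCntLT tokens e + 1) (by omega)).mpr (by omega)
        have hb : ¬ pvS tokens (pvCntLT tokens e + 1) < e := by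
          intro hx
          have := (pvCntLT_char tokens e (pvCntLT tokens e + 1) (by omega)).mp hx
          omega
        omega
      have hklt : pvCntLT tokens e < tokens.length := by omega
      have hsucc := pvS_succ tokens (pvCntLT tokens e) hklt
      exact hne ⟨pvCntLT tokens e, hklt, hS1, by omega⟩
    omega
  · rfl

-- B's pointer search lands on the token containing the offset
theorem pvFindS_spec (tokens : List String) (c : Int) (hle : pvCntLE tokens c ≤ tokens.length) :
    ∀ (m s : Nat), (pvBounds tokens 0).length - s ≤ m → s + 1 ≤ pvCntLE tokens c →
    pvFindS (pvBounds tokens 0) c s = pvCntLE tokens c - 1 := by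
  intro m
  induction m with
  | zero =>
    intro s hm hs
    have hlen := pvBounds_length tokens 0
    omega
  | succ m ih =>
    intro s hm hs
    have hlen := pvBounds_length tokens 0
    rcases Nat.lt_or_ge (s + 1) (pvCntLE tokens c) with hlt | hge
    · rw [pvFindS, dif_pos ⟨by omega, by
        rw [pvBounds_getD0 tokens (s + 1) (by omega)]
        exact (pvCntLE_char tokens c (s + 1) (by omega)).mpr hlt⟩]
      exact ih (s + 1) (by omega) (by omega)
    · have hseq : s + 1 = pvCntLE tokens c := by omega
      rw [pvFindS, dif_neg]
      · omega
      · rintro ⟨h1, h2⟩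
        rw [pvBounds_getD0 tokens (s + 1) (by omega)] at h2
        have := (pvCntLE_char tokens c (s + 1) (by omega)).mp h2
        omega

-- B's span scan, characterized pointwise
theorem pvBInner_spec (tokens : List String) (label : String) (e : Int) :
    ∀ (m k : Nat) (rows : List (List String)),
    tokens.length - k ≤ m → rows.length = tokens.length →
    ((pvBInner (pvBounds tokens 0) tokens.length label e k rows).length = rows.length ∧
     ∀ j < tokens.length,
       (pvBInner (pvBounds tokens 0) tokens.length label e k rows).getD j [] =
         rows.getD j [] ++ (if k ≤ j ∧ pvS tokens j < e then [label] else [])) := by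
  intro m
  induction m with
  | zero =>
    intro k rows hm hr
    have hk : tokens.length ≤ k := by omega
    rw [pvBInner, dif_neg (by rintro ⟨h1, -⟩; omega)]
    refine ⟨rfl, ?_⟩
    intro j hj
    rw [if_neg (by rintro ⟨h1, -⟩; omega)]
    simp
  | succ m ih =>
    intro k rows hm hr
    by_cases hcond : k < tokens.length ∧ (pvBounds tokens 0).getD k 0 < e
    · rw [pvBInner, dif_pos hcond]
      obtain ⟨hk, hBk⟩ := hcond
      rw [pvBounds_getD0 tokens k (by omega)] at hBk
      obtain ⟨ihlen, ihget⟩ := ih (k + 1) (pvAppendAt rows k label)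
        (by omega) (by rw [pv_length_appendAt]; exact hr)
      refine ⟨by rw [ihlen, pv_length_appendAt], ?_⟩
      intro j hj
      rw [ihget j hj, pv_getD_appendAt rows k label j (by omega)]
      by_cases hjk : j = k
      · subst hjk
        simp [hBk, show ¬ j + 1 ≤ j by omega]
      · have h' : (k + 1 ≤ j ∧ pvS tokens j < e) ↔ (k ≤ j ∧ pvS tokens j < e) := by
          constructor <;> rintro ⟨h1, h2⟩ <;> exact ⟨by omega, h2⟩
        rw [if_neg hjk, List.append_nil, if_congr h' rfl rfl]
    · rw [pvBInner, dif_neg hcond]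
      refine ⟨rfl, ?_⟩
      intro j hj
      have hite : ¬(k ≤ j ∧ pvS tokens j < e) := by
        rintro ⟨h1, h2⟩
        rw [not_and] at hcond
        rcases Nat.lt_or_ge k tokens.length with hk | hk
        · have := hcond hk
          rw [pvBounds_getD0 tokens k (by omega)] at this
          have := pvS_mono tokens h1
          omega
        · omega
      simp [hite]

-- the two loops agree step by step
theorem pvLoop_eq (tokens : List String) :
    ∀ (labels : List (String × String)) (c : Int) (t s : Nat) (rows : List (List String)),
    rows.length = tokens.length → t < tokens.length → 0 ≤ c →
    t + 1 = pvCntLE tokens c → s ≤ t →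
    (∀ i, 1 ≤ i → i < labels.length →
        pvNoEmptyAt tokens (c + pvTextSum (labels.take i)) ∧
        c + pvTextSum (labels.take i) < pvTokSum tokens) →
    pvALoop tokens labels t (c - pvS tokens t) rows =
      pvBLoop tokens (pvBounds tokens 0) labels c s rows := by
  intro labels
  induction labels with
  | nil => intro c t s rows _ _ _ _ _ _; rfl
  | cons hd rest ih =>
    obtain ⟨text, label⟩ := hd
    intro c t s rows hr ht hc0 hcnt hst hpre
    have htext0 : 0 ≤ PySem.Str.len text := pvLen_nonneg text
    have hLEc_le : pvCntLE tokens c ≤ tokens.length := by omega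
    have hSt : pvS tokens t ≤ c := (pvCntLE_char tokens c t (by omega)).mpr (by omega)
    simp only [pvALoop, pvBLoop]
    -- B locates the same start token A's cursor sits on
    have hfind : pvFindS (pvBounds tokens 0) c s = t := by
      rw [pvFindS_spec tokens c hLEc_le (pvBounds tokens 0).length s (by omega) (by omega)]
      omega
    rw [hfind]
    set e := c + PySem.Str.len text with he_def
    have harg : c - pvS tokens t + PySem.Str.len text = e - pvS tokens t := by
      rw [he_def]; ring
    rw [harg]
    have hr1 : (pvAppendAt rows t label).length = tokens.length := by
      rw [pv_length_appendAt]; exact hr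
    obtain ⟨hrowsA, hlenA, hcur, hrem⟩ :=
      pvAWhile_spec tokens label e tokens.length t (pvAppendAt rows t label)
        (by omega) ht hr1 (by omega)
    obtain ⟨hlenB, hrowsB⟩ :=
      pvBInner_spec tokens label e tokens.length (t + 1) (pvAppendAt rows t label)
        (by omega) hr1
    -- the row states after this label agree
    have hrows2 : (pvAWhile tokens label t (e - pvS tokens t) (pvAppendAt rows t label)).2.2 =
        pvBInner (pvBounds tokens 0) tokens.length label e (t + 1) (pvAppendAt rows t label) := by
      apply List.ext_getElem
      · rw [hlenA, hlenB]
      · intro j hj1 hj2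
        have hj : j < tokens.length := by rw [hlenA, hr1] at hj1; exact hj1
        rw [← List.getD_eq_getElem _ [] hj1, ← List.getD_eq_getElem _ [] hj2,
          hrowsA j hj, hrowsB j hj]
        have : (t < j ∧ pvS tokens j < e) ↔ (t + 1 ≤ j ∧ pvS tokens j < e) := by
          constructor <;> rintro ⟨h1, h2⟩ <;> exact ⟨by omega, h2⟩
        by_cases hcnd : t < j ∧ pvS tokens j < e
        · rw [if_pos hcnd, if_pos (this.mp hcnd)]
        · rw [if_neg hcnd, if_neg (fun h => hcnd (this.mpr h))]
    rw [hrem, hcur, hrows2]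
    cases rest with
    | nil => simp only [pvALoop, pvBLoop]
    | cons hd2 rest2 =>
      obtain ⟨hnee, hetot⟩ := hpre 1 (by omega) (by simp)
      have hne : pvNoEmptyAt tokens e := by
        have : pvTextSum (((text, label) :: hd2 :: rest2).take 1) = PySem.Str.len text := by
          simp [pvTextSum]
        rwa [this] at hnee
      have hetot' : e < pvTokSum tokens := by
        have : pvTextSum (((text, label) :: hd2 :: rest2).take 1) = PySem.Str.len text := by
          simp [pvTextSum]
        rwa [this] at hetot
      have hstop := pvStop_eq tokens t e hne
      have hLEe_pos : 1 ≤ pvCntLE tokens e :=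
        (pvCntLE_char tokens e 0 (by omega)).mp (by rw [pvS_zero]; omega)
      have hLEe_le : pvCntLE tokens e ≤ tokens.length := by
        by_contra hcon
        have := (pvCntLE_char tokens e tokens.length (by omega)).mpr (by omega)
        rw [pvS_len] at this
        omega
      have hmono : pvCntLE tokens c ≤ pvCntLE tokens e := pvCntLE_mono tokens (by omega)
      rw [hstop]
      apply ih e (pvCntLE tokens e - 1) t _ (by rw [hlenB, hr1]) (by omega) (by omega) (by omega)
        (by omega)
      intro i hi1 hi2
      have hthis := hpre (i + 1) (by omega) (by simpa using hi2)
      have hT : pvTextSum (((text, label) :: hd2 :: rest2).take (i + 1)) =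
          PySem.Str.len text + pvTextSum ((hd2 :: rest2).take i) := by
        simp [pvTextSum]
      rw [hT] at hthis
      have hxx : e + pvTextSum ((hd2 :: rest2).take i) =
          c + (PySem.Str.len text + pvTextSum ((hd2 :: rest2).take i)) := by
        rw [he_def]; ring
      rw [hxx]
      exact hthis

-- ===== VERDICT (by name: the statement is the Claim_ definition above) =====
theorem retokenize_labels_spec : Claim_equal_retokenize_labels := by
  unfold Claim_equal_retokenize_labels
  intro labels tokens _ hpre
  obtain ⟨h0, hall⟩ := hpre
  unfold Spec_retokenize_labels retokenize_labels retokenize_labels_alt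
  cases labels with
  | nil => rfl
  | cons hd tl =>
    have htk : tokens ≠ [] := by
      rcases h0 with h | h
      · exact absurd h (by simp)
      · exact h
    have hn : 0 < tokens.length := List.length_pos_of_ne_nil htk
    -- Pre_ at i = 0: no zero-length token sits at offset 0, so token 0 is nonempty and LE 0 = 1
    have hne0 : pvNoEmptyAt tokens 0 := by
      have := (hall 0 (by simp)).1
      simpa [pvTextSum] using this
    have htok0 : 0 < PySem.Str.len (tokens.getD 0 "") := by
      by_contra hcon
      have hnn := pvLen_nonneg (tokens.getD 0 "")
      exact hne0 ⟨0, hn, pvS_zero tokens, by omega⟩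
    have hLE0 : pvCntLE tokens 0 = 1 := by
      have h1 : 1 ≤ pvCntLE tokens 0 :=
        (pvCntLE_char tokens 0 0 (by omega)).mp (by rw [pvS_zero])
      have h2 : pvCntLE tokens 0 ≤ 1 := by
        by_contra hcon
        have hS1 := (pvCntLE_char tokens 0 1 (by omega)).mpr (by omega)
        have hsucc := pvS_succ tokens 0 hn
        rw [pvS_zero] at hsucc
        simp only [zero_add] at hsucc
        omega
      omega
    have heq := pvLoop_eq tokens (hd :: tl) 0 0 0
      (tokens.map (fun _ => ([] : List String))) (by simp) hn (by omega) (by omega) (by omega)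
      (by
        intro i hi1 hi2
        have := hall i hi2
        refine ⟨by simpa using this.1, ?_⟩
        have h2 := this.2 hi1
        simpa using h2)
    rw [pvS_zero, sub_zero] at heq
    exact heq
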